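-- pv_equiv track=rewrite | github.com/necusjz/TopoViz | backend/utils.py | pair_path
-- ===== SOURCE A (Python) =====
-- from itertools import combinations
--
-- def pair_path(path_dict):
--     res = []
--     paths = path_dict.keys()
--     # get intersected pairs
--     for pair in list(combinations(paths, 2)):
--         set1 = set(pair[0])
--         set2 = set(pair[1])
--         if not set1.isdisjoint(set2):
--             res.append((path_dict[pair[0]], path_dict[pair[1]]))
--     return res
-- ===== SOURCE B (Python) =====
-- def pair_path(path_dict):
--     keys = list(path_dict)
--     values = list(path_dict.values())
--     # inverted index: character -> indices (increasing) of the keys containing it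
--     index = {}
--     for i, k in enumerate(keys):
--         for ch in set(k):
--             index.setdefault(ch, []).append(i)
--     # every pair of distinct key-indices sharing at least one character
--     edges = set()
--     for idxs in index.values():
--         for a in range(len(idxs) - 1):
--             i = idxs[a]
--             for j in idxs[a + 1:]:
--                 edges.add((i, j))
--     return [(values[i], values[j]) for i, j in sorted(edges)]
-- ===== Notes on version B (the rewrite author's own statement) =====
-- stated objective: alternative
-- what changed: Replaces A's scan over all key pairs (rebuilding both character sets for every pair) with a character-to-key-index inverted index whose per-character groups generate the intersecting index pairs into a deduplicating edge set, which is then sorted lexicographically to restore combinations order.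
import Mathlib
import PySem

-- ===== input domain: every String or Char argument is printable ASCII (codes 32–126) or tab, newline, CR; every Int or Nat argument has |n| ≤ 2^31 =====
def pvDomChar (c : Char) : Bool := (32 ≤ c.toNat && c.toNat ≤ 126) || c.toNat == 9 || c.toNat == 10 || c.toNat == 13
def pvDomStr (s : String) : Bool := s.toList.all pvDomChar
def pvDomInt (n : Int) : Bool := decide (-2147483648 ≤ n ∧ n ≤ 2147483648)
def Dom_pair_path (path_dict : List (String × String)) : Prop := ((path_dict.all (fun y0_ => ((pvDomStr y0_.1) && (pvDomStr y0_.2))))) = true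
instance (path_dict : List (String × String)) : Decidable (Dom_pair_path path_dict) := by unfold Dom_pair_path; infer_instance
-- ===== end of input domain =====

-- B replaces A's quadratic scan over all key pairs (building both character
-- sets afresh for every pair) by a character->key-index inverted index whose
-- groups generate the intersecting index pairs directly; the deduplicated edge
-- set is sorted to restore combinations order.

-- ===== PORT A =====
-- dict parameter -> PySem.Dict built from the association list; path_dict[k]
-- is ported as getD (the key is always a dict key, so KeyError is impossible).
def pair_path (path_dict : List (String × String)) : List (String × String) :=
  let d := PySem.Dict.ofList path_dict
  let paths := d.keys
  (PySem.List.combinations paths 2).foldl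
    (fun res pair =>
      match pair with
      | [k1, k2] =>
        let set1 := PySem.Set.ofList k1.toList
        let set2 := PySem.Set.ofList k2.toList
        if !(PySem.Set.isdisjoint set1 set2) then
          res ++ [(d.getD k1 "", d.getD k2 "")]
        else res
      | _ => res)  -- unreachable totality branch: combinations(·, 2) yields only length-2 tuples
    []

-- ===== PORT B =====
-- enumerate(keys): indices are non-negative, so a Nat counter is exact
def pvEnum {α : Type} (i : Nat) : List α → List (Nat × α)
  | [] => []
  | x :: t => (i, x) :: pvEnum (i + 1) t

-- for a in range(len(idxs)-1): for j in idxs[a+1:]: edges.add((idxs[a], j))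
def pvAddPairs (es : PySem.Set (Nat × Nat)) : List Nat → PySem.Set (Nat × Nat)
  | [] => es
  | i :: rest => pvAddPairs (rest.foldl (fun es j => PySem.Set.add es (i, j)) es) rest

-- the inverted index: for i, k in enumerate(keys): for ch in set(k): index.setdefault(ch, []).append(i)
def pvIdx (ks : List String) : PySem.Dict Char (List Nat) :=
  (pvEnum 0 ks).foldl
    (fun idx p => (PySem.Set.ofList p.2.toList).foldl
      (fun idx c => idx.modify c [] (· ++ [p.1])) idx)
    PySem.Dict.empty

-- for idxs in index.values(): add all ordered pairs of idxs to the edge set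
def pvEdges (ks : List String) : PySem.Set (Nat × Nat) :=
  (pvIdx ks).values.foldl pvAddPairs PySem.Set.empty

-- values[i] with i always in range -> List.getD
def pair_path_alt (path_dict : List (String × String)) : List (String × String) :=
  let d := PySem.Dict.ofList path_dict
  let values := d.values
  (PySem.List.sorted2 (pvEdges d.keys) (fun e => e.1) (fun e => e.2)).map
    (fun e => (values.getD e.1 "", values.getD e.2 ""))

-- ===== PRECONDITION & SPEC =====
def Spec_pair_path (path_dict : List (String × String)) (out : List (String × String)) : Prop := out = pair_path_alt path_dict
instance (path_dict : List (String × String)) (out : List (String × String)) : Decidable (Spec_pair_path path_dict out) := by unfold Spec_pair_path; infer_instance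

-- ===== CLAIM (what is proved, stated in full; the proofs are below) =====
def Claim_equal_pair_path : Prop := ∀ (path_dict : List (String × String)), Dom_pair_path path_dict → Spec_pair_path path_dict (pair_path path_dict)

-- ===== LEMMAS AND PROOFS =====

-- all ordered pairs (earlier, later), in combinations order
def allPairs {α : Type} : List α → List (α × α)
  | [] => []
  | x :: t => (t.map (fun y => (x, y))) ++ allPairs t

theorem comb2 {α : Type} (l : List α) :
    PySem.List.combinations l 2 = (allPairs l).map (fun p => [p.1, p.2]) := by
  induction l with
  | nil => simp [PySem.List.combinations_nil_succ, allPairs]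
  | cons x t ih =>
    rw [show (2 : Nat) = 1 + 1 from rfl, PySem.List.combinations_cons_succ,
      PySem.List.combinations_one]
    simp [allPairs, ih, List.map_map, Function.comp]

theorem allPairs_map {α β : Type} (f : α → β) (l : List α) :
    allPairs (l.map f) = (allPairs l).map (fun q => (f q.1, f q.2)) := by
  induction l with
  | nil => simp [allPairs]
  | cons x t ih => simp [allPairs, ih, List.map_map, Function.comp]

theorem mem_allPairs {α : Type} {R : α → α → Prop} {l : List α} (h : l.Pairwise R)
    {x : α × α} (hx : x ∈ allPairs l) : x.1 ∈ l ∧ x.2 ∈ l ∧ R x.1 x.2 := by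
  induction l with
  | nil => simp [allPairs] at hx
  | cons a t ih =>
    rcases List.pairwise_cons.1 h with ⟨ha, ht⟩
    simp only [allPairs, List.mem_append, List.mem_map] at hx
    rcases hx with ⟨y, hy, rfl⟩ | hx
    · exact ⟨List.mem_cons_self, List.mem_cons_of_mem _ hy, ha y hy⟩
    · rcases ih ht hx with ⟨h1, h2, h3⟩
      exact ⟨List.mem_cons_of_mem _ h1, List.mem_cons_of_mem _ h2, h3⟩

theorem allPairs_mem_of {α : Type} (key : α → Nat) {l : List α}
    (h : l.Pairwise (fun a b => key a < key b)) {a b : α}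
    (ha : a ∈ l) (hb : b ∈ l) (hab : key a < key b) : (a, b) ∈ allPairs l := by
  induction l with
  | nil => simp at ha
  | cons x t ih =>
    rcases List.pairwise_cons.1 h with ⟨hx, ht⟩
    simp only [allPairs, List.mem_append, List.mem_map]
    rcases List.mem_cons.1 ha with rfl | ha'
    · rcases List.mem_cons.1 hb with rfl | hb'
      · omega
      · exact Or.inl ⟨b, hb', rfl⟩
    · rcases List.mem_cons.1 hb with rfl | hb'
      · exact absurd (hx a ha') (by omega)
      · exact Or.inr (ih ht ha' hb')

theorem allPairs_pairwise {α : Type} (key : α → Nat) {l : List α}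
    (h : l.Pairwise (fun a b => key a < key b)) :
    (allPairs l).Pairwise
      (fun q r => key q.1 < key r.1 ∨ (key q.1 = key r.1 ∧ key q.2 < key r.2)) := by
  induction l with
  | nil => simp [allPairs]
  | cons x t ih =>
    rcases List.pairwise_cons.1 h with ⟨hx, ht⟩
    refine List.pairwise_append.2 ⟨?_, ih ht, ?_⟩
    · exact List.Pairwise.map _ (fun a b hab => Or.inr ⟨rfl, hab⟩) ht
    · intro q hq r hr
      rcases List.mem_map.1 hq with ⟨y, _, rfl⟩
      exact Or.inl (hx r.1 (mem_allPairs ht hr).1)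

-- pvEnum facts
theorem pvEnum_map_snd {α : Type} (i : Nat) (l : List α) :
    (pvEnum i l).map (fun p => p.2) = l := by
  induction l generalizing i with
  | nil => rfl
  | cons x t ih => simp [pvEnum, ih]

theorem mem_pvEnum_le {α : Type} {i : Nat} {l : List α} {p : Nat × α}
    (hp : p ∈ pvEnum i l) : i ≤ p.1 := by
  induction l generalizing i with
  | nil => simp [pvEnum] at hp
  | cons x t ih =>
    rcases List.mem_cons.1 hp with rfl | hp'
    · simp
    · exact Nat.le_of_succ_le (ih hp')

theorem pvEnum_pairwise {α : Type} (i : Nat) (l : List α) :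
    (pvEnum i l).Pairwise (fun a b => a.1 < b.1) := by
  induction l generalizing i with
  | nil => simp [pvEnum]
  | cons x t ih =>
    refine List.pairwise_cons.2 ⟨fun b hb => ?_, ih (i + 1)⟩
    have := mem_pvEnum_le hb
    simp only [pvEnum]
    omega

theorem pvEnum_getD {α β : Type} (f : α → β) (c : β) {l : List α} {i : Nat}
    {p : Nat × α} (hp : p ∈ pvEnum i l) : (l.map f).getD (p.1 - i) c = f p.2 := by
  induction l generalizing i with
  | nil => simp [pvEnum] at hp
  | cons x t ih =>
    rcases List.mem_cons.1 hp with rfl | hp'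
    · simp
    · have h1 := mem_pvEnum_le hp'
      have : p.1 - i = (p.1 - (i + 1)) + 1 := by omega
      rw [List.map_cons, this, List.getD_cons_succ]
      exact ih hp'

-- Set fold facts
theorem nodup_Set_add {α : Type} [BEq α] [LawfulBEq α] (s : PySem.Set α) (x : α)
    (h : s.Nodup) : (PySem.Set.add s x).Nodup := by
  unfold PySem.Set.add
  split
  · exact h
  · next hc =>
    have : x ∉ s := by
      intro hm
      exact hc (by simpa [PySem.Set.contains, List.contains_iff_mem] using hm)
    refine List.Nodup.append h (List.nodup_singleton x) ?_
    intro a ha hax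
    rw [List.mem_singleton] at hax
    exact this (hax ▸ ha)

theorem mem_pvAddPairs (l : List Nat) (s : PySem.Set (Nat × Nat)) (y : Nat × Nat) :
    y ∈ pvAddPairs s l ↔ y ∈ s ∨ y ∈ allPairs l := by
  induction l generalizing s with
  | nil => simp [pvAddPairs, allPairs]
  | cons i t ih =>
    rw [pvAddPairs, ih, PySem.Set.mem_foldl_add t (fun j => (i, j)) s y]
    simp only [allPairs, List.mem_append, List.mem_map]
    constructor
    · rintro ((h | ⟨j, hj, rfl⟩) | h)
      · exact Or.inl h
      · exact Or.inr (Or.inl ⟨j, hj, rfl⟩)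
      · exact Or.inr (Or.inr h)
    · rintro (h | ⟨j, hj, rfl⟩ | h)
      · exact Or.inl (Or.inl h)
      · exact Or.inl (Or.inr ⟨j, hj, rfl⟩)
      · exact Or.inr h

theorem nodup_foldl_add {α : Type} [BEq α] [LawfulBEq α] {β : Type} (l : List β)
    (f : β → α) (s : PySem.Set α) (h : s.Nodup) :
    (l.foldl (fun s b => PySem.Set.add s (f b)) s).Nodup := by
  induction l generalizing s with
  | nil => exact h
  | cons b t ih => exact ih _ (nodup_Set_add s (f b) h)

theorem nodup_pvAddPairs (l : List Nat) (s : PySem.Set (Nat × Nat)) (h : s.Nodup) :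
    (pvAddPairs s l).Nodup := by
  induction l generalizing s with
  | nil => exact h
  | cons i t ih => exact ih _ (nodup_foldl_add t (fun j => (i, j)) s h)

theorem mem_foldl_pvAddPairs (gs : List (List Nat)) (s : PySem.Set (Nat × Nat))
    (y : Nat × Nat) :
    y ∈ gs.foldl pvAddPairs s ↔ y ∈ s ∨ ∃ g ∈ gs, y ∈ allPairs g := by
  induction gs generalizing s with
  | nil => simp
  | cons g t ih =>
    rw [List.foldl_cons, ih]
    simp only [mem_pvAddPairs, List.mem_cons]
    constructor
    · rintro ((h | h) | ⟨g', hg', h⟩)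
      · exact Or.inl h
      · exact Or.inr ⟨g, Or.inl rfl, h⟩
      · exact Or.inr ⟨g', Or.inr hg', h⟩
    · rintro (h | ⟨g', (rfl | hg'), h⟩)
      · exact Or.inl (Or.inl h)
      · exact Or.inl (Or.inr h)
      · exact Or.inr ⟨g', hg', h⟩

theorem nodup_foldl_pvAddPairs (gs : List (List Nat)) (s : PySem.Set (Nat × Nat))
    (h : s.Nodup) : (gs.foldl pvAddPairs s).Nodup := by
  induction gs generalizing s with
  | nil => exact h
  | cons g t ih => exact ih _ (nodup_pvAddPairs g s h)

-- the inverted index as one flat fold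
theorem foldl_flatMap {α β γ : Type} (g : α → List β) (f : γ → β → γ) (l : List α)
    (init : γ) :
    (l.flatMap g).foldl f init = l.foldl (fun acc x => (g x).foldl f acc) init := by
  induction l generalizing init with
  | nil => rfl
  | cons x t ih => simp [List.foldl_append, ih]

theorem pvIdx_eq_flat (ks : List String) :
    pvIdx ks = ((pvEnum 0 ks).flatMap
        (fun p => (PySem.Set.ofList p.2.toList).map (fun c => (c, p.1)))).foldl
      (fun d q => d.modify q.1 [] (· ++ [q.2])) PySem.Dict.empty := by
  rw [foldl_flatMap]
  unfold pvIdx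
  simp only [List.foldl_map]

theorem mem_keys_pvIdx (ks : List String) (c : Char) :
    c ∈ (pvIdx ks).keys ↔ ∃ p ∈ pvEnum 0 ks, c ∈ p.2.toList := by
  rw [pvIdx_eq_flat,
    PySem.Dict.keys_foldl_modify_key _ (fun q : Char × Nat => q.1) []
      (fun _ q => (fun x => x ++ [q.2]))]
  rw [PySem.Dict.keys_empty, PySem.Set.update_nil_left]
  rw [PySem.Set.mem_ofList]
  simp only [List.mem_map, List.mem_flatMap]
  constructor
  · rintro ⟨q, ⟨p, hp, ⟨ch, hch, rfl⟩⟩, rfl⟩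
    exact ⟨p, hp, (PySem.Set.mem_ofList _ _).1 hch⟩
  · rintro ⟨p, hp, hc⟩
    exact ⟨(c, p.1), ⟨p, hp, ⟨c, (PySem.Set.mem_ofList _ _).2 hc, rfl⟩⟩, rfl⟩

theorem nodup_keys_pvIdx (ks : List String) : (pvIdx ks).keys.Nodup := by
  rw [pvIdx_eq_flat]
  exact PySem.Dict.nodup_keys_foldl_modify_key _ (fun q : Char × Nat => q.1) []
    (fun _ q => (fun x => x ++ [q.2])) PySem.Dict.empty PySem.Dict.nodup_keys_empty

theorem map_filter_eq_if {α : Type} (i : α) (c : Char) (cl : List Char)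
    (h : cl.Nodup) :
    ((cl.map (fun ch => (ch, i))).filter (fun q => q.1 == c)) =
      if c ∈ cl then [(c, i)] else [] := by
  induction cl with
  | nil => simp
  | cons ch t ih =>
    rcases List.nodup_cons.1 h with ⟨hch, ht⟩
    by_cases hc : ch = c
    · subst hc
      simp [List.filter_cons, ih ht, hch]
    · simp [List.filter_cons, hc, ih ht, Ne.symm hc]

theorem flatMap_ite_singleton {α β : Type} (P : α → Prop) [DecidablePred P]
    (h : α → β) (l : List α) :
    l.flatMap (fun x => if P x then [h x] else []) =
      (l.filter (fun x => decide (P x))).map h := by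
  induction l with
  | nil => rfl
  | cons x t ih =>
    by_cases hx : P x <;> simp [List.filter_cons, hx, ih]

theorem getD_pvIdx (ks : List String) (c : Char) :
    (pvIdx ks).getD c [] =
      ((pvEnum 0 ks).filter (fun p => decide (c ∈ p.2.toList))).map (fun p => p.1) := by
  rw [pvIdx_eq_flat, PySem.Dict.getD_foldl_modify_append]
  rw [PySem.Dict.getD_empty, List.nil_append, List.filter_flatMap, List.map_flatMap]
  have hstep : ∀ p : Nat × String,
      (((PySem.Set.ofList p.2.toList).map (fun ch => (ch, p.1))).filter
          (fun q => q.1 == c)).map (fun q => (q.2 : Nat)) =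
        if c ∈ p.2.toList then [p.1] else [] := by
    intro p
    rw [map_filter_eq_if p.1 c _ (PySem.Set.nodup_ofList _)]
    by_cases hc : c ∈ p.2.toList
    · simp [hc, PySem.Set.mem_ofList]
    · simp [hc, PySem.Set.mem_ofList]
  simp only [hstep]
  exact flatMap_ite_singleton (fun p : Nat × String => c ∈ p.2.toList) (fun p => p.1) _

theorem mem_pvEdges (ks : List String) (y : Nat × Nat) :
    y ∈ pvEdges ks ↔
      ∃ pa ∈ pvEnum 0 ks, ∃ pb ∈ pvEnum 0 ks,
        pa.1 = y.1 ∧ pb.1 = y.2 ∧ y.1 < y.2 ∧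
        ∃ c, c ∈ pa.2.toList ∧ c ∈ pb.2.toList := by
  have hGpw : ∀ c : Char,
      (((pvEnum 0 ks).filter (fun p => decide (c ∈ p.2.toList))).map
        (fun p => p.1)).Pairwise (fun a b => a < b) :=
    fun c => List.Pairwise.map _ (fun _ _ hab => hab)
      (List.Pairwise.filter _ (pvEnum_pairwise 0 ks))
  have hGmem : ∀ (c : Char) (i : Nat),
      i ∈ ((pvEnum 0 ks).filter (fun p => decide (c ∈ p.2.toList))).map (fun p => p.1) ↔
        ∃ p ∈ pvEnum 0 ks, c ∈ p.2.toList ∧ p.1 = i := by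
    intro c i
    simp only [List.mem_map, List.mem_filter, decide_eq_true_eq]
    constructor
    · rintro ⟨p, ⟨hp, hc⟩, rfl⟩; exact ⟨p, hp, hc, rfl⟩
    · rintro ⟨p, hp, hc, rfl⟩; exact ⟨p, ⟨hp, hc⟩, rfl⟩
  unfold pvEdges
  rw [mem_foldl_pvAddPairs]
  rw [PySem.Dict.values_eq_map_keys _ (nodup_keys_pvIdx ks) []]
  constructor
  · rintro (h | ⟨g, hg, hy⟩)
    · simp [PySem.Set.empty] at h
    · obtain ⟨c, _, rfl⟩ := List.mem_map.1 hg
      rw [getD_pvIdx] at hy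
      obtain ⟨h1, h2, h3⟩ := mem_allPairs (hGpw c) hy
      obtain ⟨pa, hpa, hca, hpa1⟩ := (hGmem c y.1).1 h1
      obtain ⟨pb, hpb, hcb, hpb1⟩ := (hGmem c y.2).1 h2
      exact ⟨pa, hpa, pb, hpb, hpa1, hpb1, h3, c, hca, hcb⟩
  · rintro ⟨pa, hpa, pb, hpb, hpa1, hpb1, hlt, c, hca, hcb⟩
    refine Or.inr ⟨(pvIdx ks).getD c [],
      List.mem_map.2 ⟨c, ?_, rfl⟩, ?_⟩
    · exact (mem_keys_pvIdx ks c).2 ⟨pa, hpa, hca⟩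
    · rw [getD_pvIdx]
      have h1 := (hGmem c y.1).2 ⟨pa, hpa, hca, hpa1⟩
      have h2 := (hGmem c y.2).2 ⟨pb, hpb, hcb, hpb1⟩
      have := allPairs_mem_of (fun i => i) (hGpw c) h1 h2 hlt
      simpa using this

theorem nodup_pvEdges (ks : List String) : (pvEdges ks).Nodup :=
  nodup_foldl_pvAddPairs _ _ List.nodup_nil

-- the normal form of B's output pairs (index pairs of intersecting keys, in order)
def pvT (ks : List String) : List (Nat × Nat) :=
  ((allPairs (pvEnum 0 ks)).filter
      (fun q => !(PySem.Set.isdisjoint (PySem.Set.ofList q.1.2.toList)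
        (PySem.Set.ofList q.2.2.toList)))).map
    (fun q => (q.1.1, q.2.1))

theorem not_isdisjoint_iff (s t : List Char) :
    (!(PySem.Set.isdisjoint (PySem.Set.ofList s) (PySem.Set.ofList t))) = true ↔
      ∃ c, c ∈ s ∧ c ∈ t := by
  simp only [PySem.Set.isdisjoint, PySem.Set.contains, Bool.not_not, List.any_eq_true]
  constructor
  · rintro ⟨c, hc, hct⟩
    exact ⟨c, (PySem.Set.mem_ofList _ _).1 hc,
      (PySem.Set.mem_ofList _ _).1 (by simpa [List.contains_iff_mem] using hct)⟩
  · rintro ⟨c, hcs, hct⟩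
    exact ⟨c, (PySem.Set.mem_ofList _ _).2 hcs,
      by simpa [List.contains_iff_mem] using (PySem.Set.mem_ofList _ _).2 hct⟩

theorem mem_pvT (ks : List String) (y : Nat × Nat) :
    y ∈ pvT ks ↔
      ∃ pa ∈ pvEnum 0 ks, ∃ pb ∈ pvEnum 0 ks,
        pa.1 = y.1 ∧ pb.1 = y.2 ∧ y.1 < y.2 ∧
        ∃ c, c ∈ pa.2.toList ∧ c ∈ pb.2.toList := by
  unfold pvT
  simp only [List.mem_map, List.mem_filter]
  constructor
  · rintro ⟨q, ⟨hq, hov⟩, rfl⟩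
    obtain ⟨h1, h2, h3⟩ := mem_allPairs (pvEnum_pairwise 0 ks) hq
    obtain ⟨c, hc1, hc2⟩ := (not_isdisjoint_iff _ _).1 hov
    exact ⟨q.1, h1, q.2, h2, rfl, rfl, h3, c, hc1, hc2⟩
  · rintro ⟨pa, hpa, pb, hpb, h1, h2, hlt, c, hc1, hc2⟩
    refine ⟨(pa, pb),
      ⟨allPairs_mem_of (fun p => p.1) (pvEnum_pairwise 0 ks) hpa hpb
          (show pa.1 < pb.1 by omega),
        (not_isdisjoint_iff _ _).2 ⟨c, hc1, hc2⟩⟩, ?_⟩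
    rw [show (pa, pb).1.1 = y.1 from h1, show (pa, pb).2.1 = y.2 from h2]

theorem pairwise_pvT (ks : List String) :
    (pvT ks).Pairwise (fun a b => toLex a < toLex b) := by
  unfold pvT
  refine List.Pairwise.map _ (fun a b hab => ?_)
    (List.Pairwise.filter _
      (allPairs_pairwise (fun p : Nat × String => p.1) (pvEnum_pairwise 0 ks)))
  rw [Prod.Lex.lt_iff]
  simpa using hab

theorem nodup_pvT (ks : List String) : (pvT ks).Nodup := by
  exact (pairwise_pvT ks).imp
    (fun {a b} hab he => absurd hab (by rw [he]; exact lt_irrefl _))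

theorem sorted2_eq_sorted_lex (xs : List (Nat × Nat)) :
    PySem.List.sorted2 xs (fun e => e.1) (fun e => e.2) =
      PySem.List.sorted xs (fun e => toLex e) := by
  have before_eq : ∀ a b : Nat × Nat,
      (decide (a.1 < b.1) || (!decide (b.1 < a.1) && decide (a.2 < b.2))) =
        decide (toLex a < toLex b) := by
    intro a b
    rcases Nat.lt_trichotomy a.1 b.1 with h | h | h
    · have h2 : ¬ b.1 < a.1 := by omega
      simp [h, h2, Prod.Lex.lt_iff]
    · have h2 : ¬ a.1 < b.1 := by omega
      have h3 : ¬ b.1 < a.1 := by omega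
      simp [h, h2, h3, Prod.Lex.lt_iff]
    · have h2 : ¬ a.1 < b.1 := by omega
      have h3 : a.1 ≠ b.1 := by omega
      simp [h, h2, h3, Prod.Lex.lt_iff]
  rw [PySem.List.sorted_eq_foldl_insertBy]
  simp only [PySem.List.sorted2, Bool.false_eq_true, if_false, before_eq]

theorem sorted_pvEdges (ks : List String) :
    PySem.List.sorted2 (pvEdges ks) (fun e => e.1) (fun e => e.2) = pvT ks := by
  rw [sorted2_eq_sorted_lex]
  refine PySem.List.sorted_eq_of_perm_of_pairwise_lt _ _ _ ?_ ?_
  · exact (List.perm_ext_iff_of_nodup (nodup_pvT ks) (nodup_pvEdges ks)).2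
      (fun a => (mem_pvT ks a).trans (mem_pvEdges ks a).symm)
  · exact pairwise_pvT ks

theorem pair_path_norm (pd : List (String × String)) :
    pair_path pd =
      ((allPairs (PySem.Dict.ofList pd).keys).filter
          (fun p => !(PySem.Set.isdisjoint (PySem.Set.ofList p.1.toList)
            (PySem.Set.ofList p.2.toList)))).map
        (fun p => ((PySem.Dict.ofList pd).getD p.1 "",
          (PySem.Dict.ofList pd).getD p.2 "")) := by
  simp only [pair_path]
  rw [comb2, List.foldl_map]
  exact (PySem.List.foldl_append_if
    (fun p : String × String => !(PySem.Set.isdisjoint (PySem.Set.ofList p.1.toList)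
      (PySem.Set.ofList p.2.toList)))
    (fun p => ((PySem.Dict.ofList pd).getD p.1 "", (PySem.Dict.ofList pd).getD p.2 ""))
    _ []).trans (List.nil_append _)

theorem pair_path_alt_norm (pd : List (String × String)) :
    pair_path_alt pd =
      (pvT (PySem.Dict.ofList pd).keys).map
        (fun e => ((PySem.Dict.ofList pd).values.getD e.1 "",
          (PySem.Dict.ofList pd).values.getD e.2 "")) := by
  show ((PySem.List.sorted2 (pvEdges (PySem.Dict.ofList pd).keys)
      (fun e => e.1) (fun e => e.2)).map
    (fun e => ((PySem.Dict.ofList pd).values.getD e.1 "",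
      (PySem.Dict.ofList pd).values.getD e.2 ""))) = _
  rw [sorted_pvEdges]

-- ===== VERDICT (by name: the statement is the Claim_ definition above) =====
theorem pair_path_spec : Claim_equal_pair_path := by
  intro pd _
  unfold Spec_pair_path
  rw [pair_path_norm, pair_path_alt_norm]
  conv_lhs => rw [← pvEnum_map_snd 0 (PySem.Dict.ofList pd).keys]
  rw [allPairs_map, List.filter_map, List.map_map]
  simp only [pvT]
  rw [List.map_map]
  simp only [Function.comp_def]
  refine List.map_congr_left (fun q hq => ?_)
  have hq' := (List.mem_filter.1 hq).1
  obtain ⟨h1, h2, -⟩ := mem_allPairs (pvEnum_pairwise 0 (PySem.Dict.ofList pd).keys) hq'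
  rw [PySem.Dict.values_eq_map_keys _ (PySem.Dict.nodup_keys_ofList pd) ""]
  have e1 := pvEnum_getD (fun k => (PySem.Dict.ofList pd).getD k "") "" h1
  have e2 := pvEnum_getD (fun k => (PySem.Dict.ofList pd).getD k "") "" h2
  simp only [Nat.sub_zero] at e1 e2
  rw [e1, e2]
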